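-- pv_equiv track=rewrite | github.com/Panacota96/ai-cyber-lab | libs/workbench_db.py | _playbook_status_rollup
-- ===== SOURCE A (Python) =====
-- from typing import Any
--
-- def _playbook_status_rollup(stages: list[dict[str, Any]], default: str) -> str:
--     if not stages:
--         return default
--     statuses = [str(x.get("status", "pending")).strip().lower() for x in stages]
--     if any(s in {"rejected", "failed"} for s in statuses):
--         return "needs_review"
--     if all(s == "completed" for s in statuses):
--         return "completed"
--     if any(s in {"approved", "queued", "running", "completed"} for s in statuses):
--         return "in_progress"
--     return "draft"
-- ===== SOURCE B (Python) =====
-- def _playbook_status_rollup(stages: list, default: str) -> str: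
--     # Semilattice fold: map each stage to its standalone label and combine
--     # labels with an associative join, instead of scanning statuses with any/all.
--     if not stages:
--         return default
--
--     def label(x):
--         s = str(x.get("status", "pending")).strip().lower()
--         if s in ("rejected", "failed"):
--             return "needs_review"
--         if s == "completed":
--             return "completed"
--         if s in ("approved", "queued", "running"):
--             return "in_progress"
--         return "draft"
--
--     def join(a, b):
--         if a == "needs_review" or b == "needs_review":
--             return "needs_review"
--         if a == "completed" and b == "completed":
--             return "completed"
--         if a == "draft" and b == "draft":
--             return "draft"
--         return "in_progress"
--
--     out = label(stages[0])
--     for x in stages[1:]: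
--         out = join(out, label(x))
--     return out
-- ===== Notes on version B (the rewrite author's own statement) =====
-- stated objective: alternative
-- what changed: Instead of building a statuses list and running three prioritized any/all scans, B maps each stage to the label it would get alone (needs_review/completed/in_progress/draft) and folds the labels with an associative semilattice join whose table (bad absorbs; completed+completed=completed; draft+draft=draft; otherwise in_progress) reproduces the rollup.
import Mathlib
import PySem

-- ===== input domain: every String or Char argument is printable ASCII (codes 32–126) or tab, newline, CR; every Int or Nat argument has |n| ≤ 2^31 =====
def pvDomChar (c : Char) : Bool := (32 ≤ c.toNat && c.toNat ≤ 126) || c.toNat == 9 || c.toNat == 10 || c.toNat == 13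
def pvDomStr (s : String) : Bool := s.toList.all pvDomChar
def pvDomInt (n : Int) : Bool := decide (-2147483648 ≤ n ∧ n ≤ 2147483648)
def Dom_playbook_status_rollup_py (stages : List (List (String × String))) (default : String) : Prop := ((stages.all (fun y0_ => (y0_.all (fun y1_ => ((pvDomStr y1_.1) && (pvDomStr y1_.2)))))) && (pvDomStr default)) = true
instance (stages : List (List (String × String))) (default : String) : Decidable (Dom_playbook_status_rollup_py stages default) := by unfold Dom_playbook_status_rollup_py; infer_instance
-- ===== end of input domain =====

-- B replaces A's any/all scans over a statuses list by mapping each stage to its standalone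
-- label and folding the labels with an associative semilattice join; same results (alternative).

-- ===== PORT A =====
-- str(x.get("status", "pending")).strip().lower(): values are strings, so str() is identity
def pvNormStatus (x : List (String × String)) : String :=
  PySem.Str.lower (PySem.Str.strip ((PySem.Dict.mk x).getD "status" "pending"))

def playbook_status_rollup_py (stages : List (List (String × String))) (default : String) : String :=
  if stages = [] then default
  else
    let statuses := stages.map pvNormStatus
    if statuses.any (fun s => s == "rejected" || s == "failed") then "needs_review"
    else if statuses.all (fun s => s == "completed") then "completed"
    else if statuses.any (fun s => s == "approved" || s == "queued" || s == "running" || s == "completed") then "in_progress"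
    else "draft"

-- ===== PORT B =====
-- label(x): the rollup label the single stage x would get on its own
def pvLabel (x : List (String × String)) : String :=
  let s := pvNormStatus x
  if s == "rejected" || s == "failed" then "needs_review"
  else if s == "completed" then "completed"
  else if s == "approved" || s == "queued" || s == "running" then "in_progress"
  else "draft"

-- join(a, b): associative semilattice join of two rollup labels
def pvJoin (a b : String) : String :=
  if a == "needs_review" || b == "needs_review" then "needs_review"
  else if a == "completed" && b == "completed" then "completed"
  else if a == "draft" && b == "draft" then "draft"
  else "in_progress"

def playbook_status_rollup_py_alt (stages : List (List (String × String))) (default : String) : String :=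
  match stages with
  | [] => default
  | x :: xs => xs.foldl (fun acc y => pvJoin acc (pvLabel y)) (pvLabel x)

-- ===== PRECONDITION & SPEC =====
def Spec_playbook_status_rollup_py (stages : List (List (String × String))) (default : String) (out : String) : Prop := out = playbook_status_rollup_py_alt stages default
instance (stages : List (List (String × String))) (default : String) (out : String) : Decidable (Spec_playbook_status_rollup_py stages default out) := by unfold Spec_playbook_status_rollup_py; infer_instance

-- ===== CLAIM (what is proved, stated in full; the proofs are below) =====
def Claim_equal_playbook_status_rollup_py : Prop := ∀ (stages : List (List (String × String))) (default : String), Dom_playbook_status_rollup_py stages default → Spec_playbook_status_rollup_py stages default (playbook_status_rollup_py stages default)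

-- ===== LEMMAS AND PROOFS =====

-- decode a triple (has_bad, all_completed, has_progress) to a label
def pvDec3 (b c p : Bool) : String :=
  if b then "needs_review" else if c then "completed" else if p then "in_progress" else "draft"

def pvBad (y : List (String × String)) : Bool :=
  pvNormStatus y == "rejected" || pvNormStatus y == "failed"
def pvComp (y : List (String × String)) : Bool :=
  pvNormStatus y == "completed"
def pvProg (y : List (String × String)) : Bool :=
  pvNormStatus y == "approved" || pvNormStatus y == "queued" || pvNormStatus y == "running" || pvNormStatus y == "completed"

lemma pvComp_prog (y : List (String × String)) (h : pvComp y = true) : pvProg y = true := by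
  simp [pvProg, pvComp] at *; simp [h]

lemma pvLabel_dec (y : List (String × String)) :
    pvLabel y = pvDec3 (pvBad y) (pvComp y) (pvProg y) := by
  unfold pvLabel pvDec3 pvBad pvComp pvProg
  by_cases h1 : pvNormStatus y == "rejected" <;>
  by_cases h2 : pvNormStatus y == "failed" <;>
  by_cases h3 : pvNormStatus y == "completed" <;>
  by_cases h4 : pvNormStatus y == "approved" <;>
  by_cases h5 : pvNormStatus y == "queued" <;>
  by_cases h6 : pvNormStatus y == "running" <;>
  simp_all

lemma pvJoin_dec (b c p b' c' p' : Bool) (h : c = true → p = true) (h' : c' = true → p' = true) :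
    pvJoin (pvDec3 b c p) (pvDec3 b' c' p') = pvDec3 (b || b') (c && c') (p || p') := by
  cases b <;> cases c <;> cases p <;> cases b' <;> cases c' <;> cases p' <;> simp_all [pvJoin, pvDec3]

lemma pvFold_join (xs : List (List (String × String))) :
    ∀ (b c p : Bool), (c = true → p = true) →
    xs.foldl (fun acc y => pvJoin acc (pvLabel y)) (pvDec3 b c p)
      = pvDec3 (b || xs.any pvBad) (c && xs.all pvComp) (p || xs.any pvProg) := by
  induction xs with
  | nil => intro b c p h; simp
  | cons y ys ih =>
      intro b c p h
      have hstep : pvJoin (pvDec3 b c p) (pvLabel y)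
          = pvDec3 (b || pvBad y) (c && pvComp y) (p || pvProg y) := by
        rw [pvLabel_dec]; exact pvJoin_dec _ _ _ _ _ _ h (pvComp_prog y)
      have h' : (c && pvComp y) = true → (p || pvProg y) = true := by
        intro hc
        simp only [Bool.and_eq_true] at hc
        simp [pvComp_prog y hc.2]
      simp only [List.foldl, hstep, ih _ _ _ h']
      simp [Bool.or_assoc, Bool.and_assoc]

-- ===== VERDICT (by name: the statement is the Claim_ definition above) =====
theorem playbook_status_rollup_py_spec : Claim_equal_playbook_status_rollup_py := by
  intro stages default _
  unfold Spec_playbook_status_rollup_py playbook_status_rollup_py playbook_status_rollup_py_alt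
  match stages with
  | [] => simp
  | x :: xs =>
      simp only [List.map, List.any_cons, List.all_cons, List.any_map, List.all_map,
        reduceCtorEq, if_false]
      rw [pvLabel_dec, pvFold_join xs _ _ _ (pvComp_prog x)]
      by_cases h1 : (pvBad x || xs.any pvBad) = true <;>
      by_cases h2 : (pvComp x && xs.all pvComp) = true <;>
      by_cases h3 : (pvProg x || xs.any pvProg) = true <;>
      simp_all [pvDec3, pvBad, pvComp, pvProg, Function.comp]
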